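-- pv_equiv track=rewrite | github.com/NachiketKandari/InsightXpert-OpenEnv | schema_linking/perfect_linker.py | _joinable_columns_section
-- ===== SOURCE A (Python) =====
-- def _joinable_columns_section(
--     table_columns: list[tuple[str, set[str]]],
-- ) -> str:
--     """Return a text block listing shared column names between table pairs."""
--     lines: list[str] = []
--     for i, (t1, cols1) in enumerate(table_columns):
--         for t2, cols2 in table_columns[i + 1:]:
--             shared = sorted(cols1 & cols2)
--             if shared:
--                 lines.append(f"  {t1} <-> {t2}: {', '.join(shared)}")
--     if not lines:
--         return ""
--     return "\nJoinable Columns (shared column names between tables):\n" + "\n".join(lines)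
-- ===== SOURCE B (Python) =====
-- def _joinable_columns_section(
--     table_columns: list[tuple[str, set[str]]],
-- ) -> str:
--     """Inverted traversal: per distinct column, collect the tables containing it,
--     emit one (i, j, column) triple per co-occurring table pair, sort the triples
--     once, and group consecutive equal pairs into output lines."""
--     all_cols = sorted({c for _, cols in table_columns for c in cols})
--     triples: list[tuple[int, int, str]] = []
--     for c in all_cols:
--         tis = [ti for ti, (_, cols) in enumerate(table_columns) if c in cols]
--         for a, ti in enumerate(tis):
--             for tj in tis[a + 1:]:
--                 triples.append((ti, tj, c))
--     triples.sort()
--     lines: list[str] = []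
--     cur = None
--     buf: list[str] = []
--     for i, j, c in triples:
--         if cur == (i, j):
--             buf.append(c)
--         else:
--             if cur is not None:
--                 lines.append(_format_pair_line(table_columns, cur, buf))
--             cur = (i, j)
--             buf = [c]
--     if cur is not None:
--         lines.append(_format_pair_line(table_columns, cur, buf))
--     if not lines:
--         return ""
--     return "\nJoinable Columns (shared column names between tables):\n" + "\n".join(lines)
--
--
-- def _format_pair_line(table_columns, pair, cols):
--     i, j = pair
--     return f"  {table_columns[i][0]} <-> {table_columns[j][0]}: {', '.join(cols)}"
-- ===== Notes on version B (the rewrite author's own statement) =====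
-- stated objective: alternative
-- what changed: A scans every table pair and intersects their column sets (pair-major); B inverts the traversal: per distinct column it collects the tables containing it, emits one (i, j, column) triple per co-occurrence, sorts the triples once and groups consecutive equal pairs into the output lines.
import Mathlib
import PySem

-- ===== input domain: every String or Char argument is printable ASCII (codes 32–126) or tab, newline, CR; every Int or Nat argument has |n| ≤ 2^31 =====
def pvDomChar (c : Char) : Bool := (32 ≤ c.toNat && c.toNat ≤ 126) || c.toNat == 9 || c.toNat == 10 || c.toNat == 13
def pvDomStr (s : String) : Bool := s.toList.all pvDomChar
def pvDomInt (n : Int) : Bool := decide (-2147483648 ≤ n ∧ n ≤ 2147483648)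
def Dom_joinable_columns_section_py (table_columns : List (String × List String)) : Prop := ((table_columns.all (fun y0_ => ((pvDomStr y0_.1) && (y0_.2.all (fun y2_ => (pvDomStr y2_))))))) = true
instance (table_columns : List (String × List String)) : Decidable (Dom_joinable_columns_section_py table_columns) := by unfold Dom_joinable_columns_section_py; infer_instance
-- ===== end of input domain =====

-- B replaces A's pair-by-pair set-intersection scan by an inverted column→tables traversal:
-- one (i, j, column) triple per co-occurrence, sorted once and grouped per pair (alternative
-- algorithm of similar cost; not claimed faster).


-- ===== PORT A =====
def joinable_columns_section_py (table_columns : List (String × List String)) : String :=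
  let lines : List String :=
    (PySem.List.enumerate table_columns 0).foldl (fun lines p =>
      (PySem.List.slice table_columns (some (p.1 + 1)) none).foldl (fun lines q =>
        let shared := PySem.List.sorted (PySem.Set.inter p.2.2 q.2) (fun x => x)
        if shared = [] then lines
        else lines ++ ["  " ++ p.2.1 ++ " <-> " ++ q.1 ++ ": " ++ PySem.Str.join ", " shared])
        lines)
      []
  if lines = [] then ""
  else "\nJoinable Columns (shared column names between tables):\n" ++ PySem.Str.join "\n" lines

-- ===== PORT B =====
-- helper _format_pair_line of Source B (table_columns[i][0] lookups are in range wherever Source B calls it)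
def pyFmtPairLine (table_columns : List (String × List String)) (pair : Int × Int)
    (cols : List String) : String :=
  "  " ++ (PySem.List.pyGetD table_columns pair.1 ("", [])).1 ++ " <-> " ++
    (PySem.List.pyGetD table_columns pair.2 ("", [])).1 ++ ": " ++ PySem.Str.join ", " cols

-- Python sorts the (i, j, c) tuples lexicographically; Lean's componentwise order on products
-- is not that, so the sort key is the explicit lexicographic encoding — exact on tuples.
def pyTripleKey (t : Int × Int × String) : Lex (Int × Lex (Int × String)) :=
  toLex (t.1, toLex (t.2.1, t.2.2))

-- the body of Source B's grouping loop (state: lines, cur, buf)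
def pyGroupStep (table_columns : List (String × List String))
    (st : List String × Option (Int × Int) × List String) (t : Int × Int × String) :
    List String × Option (Int × Int) × List String :=
  if st.2.1 = some (t.1, t.2.1) then (st.1, st.2.1, st.2.2 ++ [t.2.2])
  else ((match st.2.1 with
         | none => st.1
         | some k => st.1 ++ [pyFmtPairLine table_columns k st.2.2]),
        some (t.1, t.2.1), [t.2.2])

-- the 'if cur is not None: lines.append(...)' epilogue of Source B
def pyGroupFinish (table_columns : List (String × List String))
    (st : List String × Option (Int × Int) × List String) : List String :=
  match st.2.1 with
  | none => st.1
  | some k => st.1 ++ [pyFmtPairLine table_columns k st.2.2]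

def joinable_columns_section_py_alt (table_columns : List (String × List String)) : String :=
  let allCols := PySem.List.sorted (PySem.Set.ofList (table_columns.flatMap (fun p => p.2))) (fun x => x)
  let triples : List (Int × Int × String) :=
    allCols.foldl (fun acc c =>
      let tis : List Int := (PySem.List.enumerate table_columns 0).filterMap
        (fun p => if c ∈ p.2.2 then some p.1 else none)
      (PySem.List.enumerate tis 0).foldl (fun acc q =>
        (PySem.List.slice tis (some (q.1 + 1)) none).foldl (fun acc tj =>
          acc ++ [(q.2, tj, c)]) acc) acc) []
  let triplesS := PySem.List.sorted triples pyTripleKey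
  let st := triplesS.foldl (pyGroupStep table_columns) ([], none, [])
  let lines := pyGroupFinish table_columns st
  if lines = [] then ""
  else "\nJoinable Columns (shared column names between tables):\n" ++ PySem.Str.join "\n" lines

-- ===== PRECONDITION & SPEC =====
-- Pre_ is the representation invariant of the Python parameter type (each cols is a set[str],
-- so its List String encoding holds distinct elements); it excludes no Python input.
def Pre_joinable_columns_section_py (table_columns : List (String × List String)) : Prop :=
  ∀ p ∈ table_columns, List.Nodup p.2
instance (table_columns : List (String × List String)) : Decidable (Pre_joinable_columns_section_py table_columns) := by unfold Pre_joinable_columns_section_py; infer_instance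

def pvWitness_joinable_columns_section_py : (List (String × List String)) :=
  [("t", ["a", "b"]), ("u", ["a"])]

def Spec_joinable_columns_section_py (table_columns : List (String × List String)) (out : String) : Prop := out = joinable_columns_section_py_alt table_columns
instance (table_columns : List (String × List String)) (out : String) : Decidable (Spec_joinable_columns_section_py table_columns out) := by unfold Spec_joinable_columns_section_py; infer_instance

-- ===== CLAIM (what is proved, stated in full; the proofs are below) =====
def Claim_equal_joinable_columns_section_py : Prop := ∀ (table_columns : List (String × List String)), Dom_joinable_columns_section_py table_columns → Pre_joinable_columns_section_py table_columns → Spec_joinable_columns_section_py table_columns (joinable_columns_section_py table_columns)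

-- ===== LEMMAS AND PROOFS =====

-- abbreviations used only by the proofs
def pvD0 : String × List String := ("", [])

def pvInterS (xs ys : List String) : List String :=
  PySem.List.sorted (PySem.Set.inter xs ys) (fun x => x)

def pvLineF (x y : String × List String) : Option String :=
  if pvInterS x.2 y.2 = [] then none
  else some ("  " ++ x.1 ++ " <-> " ++ y.1 ++ ": " ++ PySem.Str.join ", " (pvInterS x.2 y.2))

def pvRows {α β : Type} (g : α → List α → List β) : List α → List β
  | [] => []
  | x :: t => g x t ++ pvRows g t

def pvRender (lines : List String) : String :=
  if lines = [] then ""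
  else "\nJoinable Columns (shared column names between tables):\n" ++ PySem.Str.join "\n" lines

def pvTis (tc : List (String × List String)) (c : String) : List Int :=
  (PySem.List.enumerate tc 0).filterMap (fun p => if c ∈ p.2.2 then some p.1 else none)

def pvPairs (n : Int) : List (Int × Int) :=
  (PySem.List.pyRange 0 n).flatMap (fun i => (PySem.List.pyRange (i + 1) n).map (fun j => (i, j)))

def pvInterIdx (tc : List (String × List String)) (ij : Int × Int) : List String :=
  pvInterS (PySem.List.pyGetD tc ij.1 pvD0).2 (PySem.List.pyGetD tc ij.2 pvD0).2

def pvTstar (tc : List (String × List String)) : List (Int × Int × String) :=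
  (pvPairs tc.length).flatMap (fun ij => (pvInterIdx tc ij).map (fun c => (ij.1, ij.2, c)))

def pvLinesIdx (tc : List (String × List String)) : List String :=
  (pvPairs tc.length).filterMap (fun ij =>
    if pvInterIdx tc ij = [] then none
    else some (pyFmtPairLine tc ij (pvInterIdx tc ij)))

def pvTrip (tc : List (String × List String)) : List (Int × Int × String) :=
  (PySem.List.sorted (PySem.Set.ofList (tc.flatMap (fun p => p.2))) (fun x => x)).flatMap
    (fun c => pvRows (fun ti rest => rest.map (fun tj => (ti, tj, c))) (pvTis tc c))

theorem pv_foldl_enum_slice {α β : Type} (inner : Int × α → List β → α → List β)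
    (g : α → List α → List β)
    (h : ∀ (p : Int × α) (rest : List α) (acc : List β),
      rest.foldl (inner p) acc = acc ++ g p.2 rest) :
    ∀ (suf pre : List α) (acc : List β),
      (PySem.List.enumerate suf (pre.length : Int)).foldl
        (fun acc p => (PySem.List.slice (pre ++ suf) (some (p.1 + 1)) none).foldl (inner p) acc) acc
      = acc ++ pvRows g suf := by
  intro suf
  induction suf with
  | nil => intro pre acc; simp [PySem.List.enumerate_nil, pvRows]
  | cons x t ih =>
    intro pre acc
    rw [PySem.List.enumerate_cons]
    rw [List.foldl_cons]
    have hsl : PySem.List.slice (pre ++ x :: t) (some ((pre.length : Int) + 1)) none = t := by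
      have : ((pre.length : Int) + 1) = ((pre.length + 1 : Nat) : Int) := by push_cast; ring
      rw [this, PySem.List.slice_from_natCast]
      have : pre ++ x :: t = (pre ++ [x]) ++ t := by simp
      rw [this]
      have hl : pre.length + 1 = (pre ++ [x]).length := by simp
      rw [hl, List.drop_left]
    rw [hsl, h ((pre.length : Int), x) t acc]
    have hre : pre ++ x :: t = (pre ++ [x]) ++ t := by simp
    have hs : (pre.length : Int) + 1 = (((pre ++ [x]).length : Nat) : Int) := by simp
    rw [hre, hs, ih (pre ++ [x])]
    simp [pvRows]

theorem pv_inner_A (p : Int × (String × List String)) (rest : List (String × List String))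
    (acc : List String) :
    rest.foldl (fun lines q =>
        let shared := PySem.List.sorted (PySem.Set.inter p.2.2 q.2) (fun x => x)
        if shared = [] then lines
        else lines ++ ["  " ++ p.2.1 ++ " <-> " ++ q.1 ++ ": " ++ PySem.Str.join ", " shared]) acc
      = acc ++ rest.filterMap (pvLineF p.2) := by
  induction rest generalizing acc with
  | nil => simp
  | cons y t ih =>
    rw [List.foldl_cons]
    by_cases hc : pvInterS p.2.2 y.2 = [] <;>
      [have hc0 : (PySem.List.sorted (PySem.Set.inter p.2.2 y.2) fun x => x) = [] := hc;
       have hc0 : ¬ (PySem.List.sorted (PySem.Set.inter p.2.2 y.2) fun x => x) = [] := hc] <;>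
      simp [hc0, ih, pvLineF, pvInterS]

theorem pv_foldl_flat {α β : Type} (F : List β → α → List β) (f : α → List β)
    (h : ∀ acc x, F acc x = acc ++ f x) : ∀ (l : List α) (acc : List β),
    l.foldl F acc = acc ++ l.flatMap f := by
  intro l
  induction l with
  | nil => simp
  | cons x t ih => intro acc; rw [List.foldl_cons, h, ih]; simp

theorem pv_run_same (tc : List (String × List String)) (k : Int × Int) :
    ∀ (cs : List String) (lines : List String) (buf : List String),
      (cs.map (fun c => (k.1, k.2, c))).foldl (pyGroupStep tc) (lines, some k, buf)
        = (lines, some k, buf ++ cs) := by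
  intro cs
  induction cs with
  | nil => simp
  | cons c t ih =>
    intro lines buf
    simp only [List.map_cons, List.foldl_cons]
    have hstep : pyGroupStep tc (lines, some k, buf) (k.1, k.2, c) = (lines, some k, buf ++ [c]) := by
      simp [pyGroupStep]
    rw [hstep, ih]
    simp

theorem pv_group_flat (tc : List (String × List String)) :
    ∀ (bs : List ((Int × Int) × List String)) (st : List String × Option (Int × Int) × List String),
      (∀ b ∈ bs, st.2.1 ≠ some b.1) →
      List.Pairwise (fun b b' => b.1 ≠ b'.1) bs →
      pyGroupFinish tc ((bs.flatMap (fun b => b.2.map (fun c => (b.1.1, b.1.2, c)))).foldl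
          (pyGroupStep tc) st)
        = pyGroupFinish tc st
          ++ bs.filterMap (fun b => if b.2 = [] then none else some (pyFmtPairLine tc b.1 b.2)) := by
  intro bs
  induction bs with
  | nil => simp
  | cons b bs ih =>
    intro st hcur hpw
    obtain ⟨bk, bcs⟩ := b
    rw [List.flatMap_cons, List.foldl_append]
    rcases bcs with _ | ⟨c, cs⟩
    · simp only [List.map_nil, List.foldl_nil, List.filterMap_cons]
      rw [ih st (fun b' hb' => hcur b' (List.mem_cons_of_mem _ hb'))
        (List.Pairwise.sublist (List.sublist_cons_self _ _) hpw)]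
      simp
    · obtain ⟨lines, cur, buf⟩ := st
      have hne : cur ≠ some bk := hcur (bk, c :: cs) (List.mem_cons_self)
      have hstep : pyGroupStep tc (lines, cur, buf) (bk.1, bk.2, c)
          = (pyGroupFinish tc (lines, cur, buf), some bk, [c]) := by
        cases cur with
        | none => simp [pyGroupStep, pyGroupFinish]
        | some k =>
          have hk : ¬ (k = (bk.1, bk.2)) := by
            intro h; exact hne (by simp [h])
          simp [pyGroupStep, pyGroupFinish, hk]
      simp only [List.map_cons, List.foldl_cons, hstep]
      have hrun := pv_run_same tc bk cs (pyGroupFinish tc (lines, cur, buf)) [c]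
      rw [hrun]
      have hih := ih (pyGroupFinish tc (lines, cur, buf), some bk, [c] ++ cs)
        (fun b' hb' => by
          simp only [ne_eq, Option.some.injEq]
          exact (List.rel_of_pairwise_cons hpw hb'))
        (List.Pairwise.sublist (List.sublist_cons_self _ _) hpw)
      rw [hih]
      simp [pyGroupFinish]

theorem pv_pairs_pairwise (n : Int) :
    (pvPairs n).Pairwise (fun p q => p.1 < q.1 ∨ (p.1 = q.1 ∧ p.2 < q.2)) := by
  unfold pvPairs
  rw [List.flatMap]
  rw [List.pairwise_flatten]
  constructor
  · intro l hl
    simp only [List.mem_map] at hl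
    obtain ⟨i, _, rfl⟩ := hl
    rw [List.pairwise_map]
    exact (PySem.List.pairwise_lt_pyRange_one (i + 1) n).imp (fun h => Or.inr ⟨rfl, h⟩)
  · rw [List.pairwise_map]
    apply (PySem.List.pairwise_lt_pyRange_one 0 n).imp
    intro i i' hii x hx y hy
    simp only [List.mem_map] at hx hy
    obtain ⟨j, _, rfl⟩ := hx
    obtain ⟨j', _, rfl⟩ := hy
    exact Or.inl hii

theorem pv_mem_pairs (n : Int) (p : Int × Int) :
    p ∈ pvPairs n ↔ 0 ≤ p.1 ∧ p.1 < p.2 ∧ p.2 < n := by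
  unfold pvPairs
  simp only [List.mem_flatMap, List.mem_map, PySem.List.mem_pyRange_one]
  constructor
  · rintro ⟨i, ⟨h0, _⟩, j, ⟨hj1, hj2⟩, rfl⟩
    exact ⟨h0, by omega, hj2⟩
  · rintro ⟨h0, hlt, hn⟩
    exact ⟨p.1, ⟨h0, by omega⟩, p.2, ⟨by omega, hn⟩, rfl⟩

theorem pv_key_lt (a b : Int × Int × String) :
    pyTripleKey a < pyTripleKey b
      ↔ (a.1 < b.1 ∨ (a.1 = b.1 ∧ (a.2.1 < b.2.1 ∨ (a.2.1 = b.2.1 ∧ a.2.2 < b.2.2)))) := by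
  simp [pyTripleKey, Prod.Lex.lt_iff]

theorem pv_mem_tis (tc : List (String × List String)) (c : String) (i : Int) :
    i ∈ pvTis tc c ↔ 0 ≤ i ∧ i < (tc.length : Int) ∧ c ∈ (PySem.List.pyGetD tc i pvD0).2 := by
  unfold pvTis
  simp only [List.mem_filterMap, PySem.List.mem_enumerate_iff]
  constructor
  · rintro ⟨p, ⟨k, hk, rfl⟩, hp⟩
    simp only [zero_add] at hp ⊢
    split_ifs at hp with hc
    · obtain rfl : (k : Int) = i := by injection hp
      refine ⟨by positivity, by exact_mod_cast hk, ?_⟩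
      rw [PySem.List.pyGetD_natCast, List.getD_eq_getElem _ _ hk]
      exact hc
  · rintro ⟨h0, hn, hc⟩
    have hk : i.toNat < tc.length := by omega
    have hc' : c ∈ tc[i.toNat].2 := by
      rw [PySem.List.pyGetD_eq_getElem tc pvD0 h0 hn] at hc
      exact hc
    refine ⟨((i.toNat : Int), tc[i.toNat]), ⟨i.toNat, hk, by simp⟩, ?_⟩
    simp [hc', Int.toNat_of_nonneg h0]

theorem pv_tis_pairwise (tc : List (String × List String)) (c : String) :
    (pvTis tc c).Pairwise (· < ·) := by
  unfold pvTis
  refine List.Pairwise.filterMap _ ?_ (PySem.List.pairwise_lt_enumerate tc 0)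
  intro a b hab x hx y hy
  by_cases ha : c ∈ a.2.2 <;> simp [ha] at hx
  by_cases hb : c ∈ b.2.2 <;> simp [hb] at hy
  omega

theorem pv_mem_rowsPairs (c : String) :
    ∀ (l : List Int), l.Pairwise (· < ·) → ∀ (x y : Int) (z : String),
      ((x, y, z) ∈ pvRows (fun ti rest => rest.map (fun tj => (ti, tj, c))) l
        ↔ x ∈ l ∧ y ∈ l ∧ x < y ∧ z = c) := by
  intro l
  induction l with
  | nil => intro _ x y z; simp [pvRows]
  | cons a t ih =>
    intro hp x y z
    have ha : ∀ b ∈ t, a < b := fun b hb => List.rel_of_pairwise_cons hp hb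
    have ht := List.Pairwise.sublist (List.sublist_cons_self _ _) hp
    simp only [pvRows, List.mem_append, List.mem_map, ih ht, List.mem_cons]
    constructor
    · rintro (⟨tj, htj, heq⟩ | ⟨hx, hy, hlt, rfl⟩)
      · simp only [Prod.mk.injEq] at heq
        obtain ⟨rfl, rfl, rfl⟩ := heq
        exact ⟨Or.inl rfl, Or.inr htj, ha _ htj, rfl⟩
      · exact ⟨Or.inr hx, Or.inr hy, hlt, rfl⟩
    · rintro ⟨hx | hx, hy | hy, hlt, rfl⟩
      · subst hx; subst hy; omega
      · subst hx; exact Or.inl ⟨y, hy, rfl⟩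
      · subst hy; have := ha x hx; omega
      · exact Or.inr ⟨hx, hy, hlt, rfl⟩

theorem pv_rowsPairs_pairwise (c : String) :
    ∀ (l : List Int), l.Pairwise (· < ·) →
      (pvRows (fun ti rest => rest.map (fun tj => (ti, tj, c))) l).Pairwise
        (fun p q => p.1 < q.1 ∨ (p.1 = q.1 ∧ p.2.1 < q.2.1)) := by
  intro l
  induction l with
  | nil => intro _; simp [pvRows]
  | cons a t ih =>
    intro hp
    have ha : ∀ b ∈ t, a < b := fun b hb => List.rel_of_pairwise_cons hp hb
    have ht := List.Pairwise.sublist (List.sublist_cons_self _ _) hp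
    simp only [pvRows]
    rw [List.pairwise_append]
    refine ⟨?_, ih ht, ?_⟩
    · rw [List.pairwise_map]
      exact ht.imp (fun h => Or.inr ⟨rfl, h⟩)
    · intro x hx y hy
      simp only [List.mem_map] at hx
      obtain ⟨tj, _, rfl⟩ := hx
      obtain ⟨y1, y2, y3⟩ := y
      have := ((pv_mem_rowsPairs c t ht y1 y2 y3).mp hy).1
      exact Or.inl (ha _ this)

theorem pv_trip_nodup (tc : List (String × List String)) : (pvTrip tc).Nodup := by
  unfold pvTrip
  rw [List.flatMap, List.Nodup, List.pairwise_flatten]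
  constructor
  · intro l hl
    simp only [List.mem_map] at hl
    obtain ⟨c, _, rfl⟩ := hl
    exact (pv_rowsPairs_pairwise c _ (pv_tis_pairwise tc c)).imp
      (fun {p q} h heq => by
        rcases h with h | ⟨h1, h2⟩
        · exact absurd (congrArg Prod.fst heq) (by simpa using Int.ne_of_lt h)
        · exact absurd (congrArg (fun r => r.2.1) heq) (by simpa using Int.ne_of_lt h2))
  · rw [List.pairwise_map]
    apply (PySem.List.sorted_ofList_pairwise_lt _).imp
    intro c c' hcc x hx y hy heq
    obtain ⟨x1, x2, x3⟩ := x
    obtain ⟨y1, y2, y3⟩ := y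
    have hx3 := ((pv_mem_rowsPairs c _ (pv_tis_pairwise tc c) x1 x2 x3).mp hx).2.2.2
    have hy3 := ((pv_mem_rowsPairs c' _ (pv_tis_pairwise tc c') y1 y2 y3).mp hy).2.2.2
    subst hx3; subst hy3
    have := congrArg (fun r => r.2.2) heq
    simp only at this
    exact absurd this (by simpa using ne_of_lt hcc)

theorem pv_tstar_pairwise (tc : List (String × List String))
    (hn : Pre_joinable_columns_section_py tc) :
    (pvTstar tc).Pairwise (fun a b => pyTripleKey a < pyTripleKey b) := by
  unfold pvTstar
  rw [List.flatMap, List.pairwise_flatten]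
  constructor
  · intro l hl
    simp only [List.mem_map] at hl
    obtain ⟨ij, hij, rfl⟩ := hl
    rw [List.pairwise_map]
    have hmem := (pv_mem_pairs _ ij).mp hij
    have hnd : (pvInterIdx tc ij).Nodup := by
      have h1 : 0 ≤ ij.1 := hmem.1
      have h2 : ij.1 < (tc.length : Int) := by have := hmem.2.1; have := hmem.2.2; omega
      have hin : PySem.List.pyGetD tc ij.1 pvD0 ∈ tc := by
        rw [PySem.List.pyGetD_eq_getElem tc pvD0 h1 h2]
        exact List.getElem_mem _
      have := hn _ hin
      unfold pvInterIdx pvInterS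
      exact ((PySem.List.sorted_perm _ _ _).nodup_iff).mpr (PySem.Set.nodup_inter _ _ this)
    have hle : (pvInterIdx tc ij).Pairwise (· ≤ ·) := by
      unfold pvInterIdx pvInterS
      exact PySem.List.sorted_pairwise _ _
    have hlt : (pvInterIdx tc ij).Pairwise (· < ·) :=
      (hle.and hnd).imp (fun ⟨h1, h2⟩ => lt_of_le_of_ne h1 h2)
    refine hlt.imp ?_
    intro c c' h
    exact (pv_key_lt (ij.1, ij.2, c) (ij.1, ij.2, c')).mpr (Or.inr ⟨rfl, Or.inr ⟨rfl, h⟩⟩)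
  · rw [List.pairwise_map]
    apply (pv_pairs_pairwise (tc.length : Int)).imp
    intro ij ij' hij x hx y hy
    simp only [List.mem_map] at hx hy
    obtain ⟨cx, _, rfl⟩ := hx
    obtain ⟨cy, _, rfl⟩ := hy
    rcases hij with h | ⟨h1, h2⟩
    · exact (pv_key_lt _ _).mpr (Or.inl h)
    · exact (pv_key_lt _ _).mpr (Or.inr ⟨h1, Or.inl h2⟩)

theorem pv_mem_iff (tc : List (String × List String)) (x y : Int) (z : String) :
    (x, y, z) ∈ pvTrip tc ↔ (x, y, z) ∈ pvTstar tc := by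
  unfold pvTrip pvTstar
  simp only [List.mem_flatMap, List.mem_map]
  constructor
  · rintro ⟨c, hc, hmem⟩
    rw [pv_mem_rowsPairs c _ (pv_tis_pairwise tc c)] at hmem
    obtain ⟨hx, hy, hlt, rfl⟩ := hmem
    rw [pv_mem_tis] at hx hy
    refine ⟨(x, y), (pv_mem_pairs _ (x, y)).mpr ⟨hx.1, hlt, hy.2.1⟩, z, ?_, rfl⟩
    unfold pvInterIdx pvInterS
    rw [PySem.List.mem_sorted, PySem.Set.mem_inter]
    exact ⟨hx.2.2, hy.2.2⟩
  · rintro ⟨ij, hij, c, hc, heq⟩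
    obtain ⟨i0, j0⟩ := ij
    simp only [Prod.mk.injEq] at heq
    obtain ⟨rfl, rfl, rfl⟩ := heq
    rw [pv_mem_pairs] at hij
    unfold pvInterIdx pvInterS at hc
    rw [PySem.List.mem_sorted, PySem.Set.mem_inter] at hc
    have h0 : (0 : Int) ≤ i0 := hij.1
    have hij1 : i0 < j0 := hij.2.1
    have hij2 : j0 < (tc.length : Int) := hij.2.2
    have hxn : i0 < (tc.length : Int) := by omega
    refine ⟨c, ?_, ?_⟩
    · rw [PySem.List.mem_sorted, PySem.Set.mem_ofList, List.mem_flatMap]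
      refine ⟨PySem.List.pyGetD tc i0 pvD0, ?_, hc.1⟩
      rw [PySem.List.pyGetD_eq_getElem tc pvD0 h0 hxn]
      exact List.getElem_mem _
    · rw [pv_mem_rowsPairs _ _ (pv_tis_pairwise tc c)]
      exact ⟨(pv_mem_tis tc c i0).mpr ⟨h0, hxn, hc.1⟩,
        (pv_mem_tis tc c j0).mpr ⟨by omega, hij2, hc.2⟩, hij1, rfl⟩

theorem pv_sorted_trip (tc : List (String × List String))
    (hn : Pre_joinable_columns_section_py tc) :
    PySem.List.sorted (pvTrip tc) pyTripleKey = pvTstar tc := by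
  apply PySem.List.sorted_eq_of_perm_of_pairwise_lt
  · have h1 := pv_trip_nodup tc
    have h2 : (pvTstar tc).Nodup := by
      refine ((pv_tstar_pairwise tc hn).imp ?_)
      intro a b h heq
      subst heq
      exact absurd h (lt_irrefl _)
    rw [List.perm_ext_iff_of_nodup h2 h1]
    intro a
    obtain ⟨x, y, z⟩ := a
    exact (pv_mem_iff tc x y z).symm
  · exact pv_tstar_pairwise tc hn

theorem pv_A_lines (tc : List (String × List String)) :
    joinable_columns_section_py tc
      = pvRender (pvRows (fun x rest => rest.filterMap (pvLineF x)) tc) := by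
  have h := pv_foldl_enum_slice
      (fun p lines q =>
        let shared := PySem.List.sorted (PySem.Set.inter p.2.2 q.2) (fun x => x)
        if shared = [] then lines
        else lines ++ ["  " ++ p.2.1 ++ " <-> " ++ q.1 ++ ": " ++ PySem.Str.join ", " shared])
      (fun x rest => rest.filterMap (pvLineF x))
      (fun p rest acc => pv_inner_A p rest acc) tc [] []
  simp only [List.length_nil, Nat.cast_zero, List.nil_append] at h
  show pvRender _ = _
  rw [h]

theorem pv_B_lines (tc : List (String × List String)) :
    joinable_columns_section_py_alt tc
      = pvRender (pyGroupFinish tc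
          ((PySem.List.sorted (pvTrip tc) pyTripleKey).foldl (pyGroupStep tc) ([], none, []))) := by
  have htr : (PySem.List.sorted (PySem.Set.ofList (tc.flatMap (fun p => p.2))) (fun x => x)).foldl
      (fun acc c =>
        let tis : List Int := (PySem.List.enumerate tc 0).filterMap
          (fun p => if c ∈ p.2.2 then some p.1 else none)
        (PySem.List.enumerate tis 0).foldl (fun acc q =>
          (PySem.List.slice tis (some (q.1 + 1)) none).foldl (fun acc tj =>
            acc ++ [(q.2, tj, c)]) acc) acc) []
      = pvTrip tc := by
    rw [pv_foldl_flat _ (fun c => pvRows (fun ti rest => rest.map (fun tj => (ti, tj, c))) (pvTis tc c))]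
    · simp [pvTrip]
    · intro acc c
      have h2 := pv_foldl_enum_slice
        (fun q acc tj => acc ++ [(q.2, tj, c)])
        (fun ti rest => rest.map (fun tj => (ti, tj, c)))
        (fun q rest acc => PySem.List.foldl_append_singleton_eq_map (fun tj => (q.2, tj, c)) rest acc)
        (pvTis tc c) [] acc
      simp only [List.length_nil, Nat.cast_zero, List.nil_append] at h2
      exact h2
  show pvRender _ = _
  rw [htr]

theorem pv_group (tc : List (String × List String)) :
    pyGroupFinish tc ((pvTstar tc).foldl (pyGroupStep tc) ([], none, [])) = pvLinesIdx tc := by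
  have hpwne : List.Pairwise (fun b b' => b.1 ≠ b'.1)
      ((pvPairs (tc.length : Int)).map (fun ij => (ij, pvInterIdx tc ij))) := by
    rw [List.pairwise_map]
    refine (pv_pairs_pairwise (tc.length : Int)).imp ?_
    intro p q h heq
    rcases h with h | ⟨h1, h2⟩
    · exact absurd (congrArg Prod.fst heq) (by simpa using Int.ne_of_lt h)
    · exact absurd (congrArg Prod.snd heq) (by simpa using Int.ne_of_lt h2)
  have hbs := pv_group_flat tc ((pvPairs (tc.length : Int)).map (fun ij => (ij, pvInterIdx tc ij)))
    ([], none, []) (fun b _ => by simp) hpwne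
  rw [List.flatMap_map, List.filterMap_map] at hbs
  simpa [pvTstar, pvLinesIdx, pyGroupFinish, Function.comp] using hbs

theorem pv_flat_range_rows {α β : Type} (g : α → List α → List β) (d : α) :
    ∀ (tc : List α),
      (List.range tc.length).flatMap (fun k => g (tc.getD k d) (tc.drop (k + 1))) = pvRows g tc := by
  intro tc
  induction tc with
  | nil => simp [pvRows]
  | cons x t ih =>
    rw [List.length_cons, List.range_succ_eq_map, List.flatMap_cons]
    simp only [List.getD_cons_zero, List.drop_succ_cons, List.drop_zero, List.flatMap_map]
    have h : (fun a => g ((x :: t).getD a.succ d) (t.drop a.succ))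
         = (fun k => g (t.getD k d) (t.drop (k + 1))) := by
      funext k; simp
    rw [h, ih]
    rfl

theorem pv_rows_eq (tc : List (String × List String)) :
    pvRows (fun x rest => rest.filterMap (pvLineF x)) tc = pvLinesIdx tc := by
  unfold pvLinesIdx pvPairs
  rw [List.filterMap_flatMap]
  have h1 : ∀ i ∈ PySem.List.pyRange 0 (tc.length : Int),
      ((PySem.List.pyRange (i + 1) (tc.length : Int)).map (fun j => ((i, j) : Int × Int))).filterMap
          (fun ij => if pvInterIdx tc ij = [] then none
                     else some (pyFmtPairLine tc ij (pvInterIdx tc ij)))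
        = (tc.drop (i + 1).toNat).filterMap (pvLineF (PySem.List.pyGetD tc i pvD0)) := by
    intro i hi
    rw [PySem.List.mem_pyRange_one] at hi
    rw [List.filterMap_map]
    have h2 : ((fun ij => if pvInterIdx tc ij = [] then none
                     else some (pyFmtPairLine tc ij (pvInterIdx tc ij))) ∘ (fun j => ((i, j) : Int × Int)))
        = (fun j => pvLineF (PySem.List.pyGetD tc i pvD0) (PySem.List.pyGetD tc j pvD0)) := by
      funext j
      simp only [Function.comp, pvInterIdx, pvLineF, pyFmtPairLine, pvD0]
    rw [h2]
    have h3 : (fun j => pvLineF (PySem.List.pyGetD tc i pvD0) (PySem.List.pyGetD tc j pvD0))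
        = (fun y => pvLineF (PySem.List.pyGetD tc i pvD0) y) ∘ (fun j => PySem.List.pyGetD tc j pvD0) := rfl
    rw [h3, ← List.filterMap_map, PySem.List.map_pyGetD_pyRange' tc pvD0 (by omega)]
  rw [List.flatMap_congr h1]
  rw [PySem.List.pyRange_zero_nat, List.flatMap_map]
  have h4 : (fun (k : Nat) => (tc.drop (((k : Int)) + 1).toNat).filterMap (pvLineF (PySem.List.pyGetD tc (k : Int) pvD0)))
      = (fun (k : Nat) => (tc.drop (k + 1)).filterMap (pvLineF (tc.getD k pvD0))) := by
    funext k
    have : ((k : Int) + 1).toNat = k + 1 := by omega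
    rw [this, PySem.List.pyGetD_natCast]
  rw [h4]
  exact (pv_flat_range_rows (fun x rest => rest.filterMap (pvLineF x)) pvD0 tc).symm

-- ===== VERDICT (by name: the statement is the Claim_ definition above) =====
theorem joinable_columns_section_py_spec : Claim_equal_joinable_columns_section_py := by
  intro tc _ hpre
  unfold Spec_joinable_columns_section_py
  rw [pv_A_lines, pv_B_lines, pv_sorted_trip tc hpre, pv_group, pv_rows_eq]
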